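-- pv_equiv track=rewrite | github.com/mat2ja/napredni-python | kol/K1/sintic.py | sifre
-- ===== SOURCE A (Python) =====
-- def sifre(st):
--     lista = []
--     slova = 'aeiou'
--     for slovo in st:
--         if ord(slovo)-10 >= 97:
--             lista.append(chr(ord(slovo)-10))
--         else:
--             lista.append(chr(ord(slovo)-10+26))
--
--     postoji_li = any(item in lista for item in slova)
--     return postoji_li
-- ===== SOURCE B (Python) =====
-- def sifre(st):
--     for slovo in st:
--         o = ord(slovo) - 10
--         if o < 97:
--             o += 26
--         if chr(o) in 'aeiou':
--             return True
--     return False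
-- ===== Notes on version B (the rewrite author's own statement) =====
-- stated objective: faster
-- what changed: Replaces A's build-a-shifted-list-then-scan-it-for-each-vowel with a single early-exiting pass over the string testing each shifted character for vowel membership directly, building no list.
import Mathlib
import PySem

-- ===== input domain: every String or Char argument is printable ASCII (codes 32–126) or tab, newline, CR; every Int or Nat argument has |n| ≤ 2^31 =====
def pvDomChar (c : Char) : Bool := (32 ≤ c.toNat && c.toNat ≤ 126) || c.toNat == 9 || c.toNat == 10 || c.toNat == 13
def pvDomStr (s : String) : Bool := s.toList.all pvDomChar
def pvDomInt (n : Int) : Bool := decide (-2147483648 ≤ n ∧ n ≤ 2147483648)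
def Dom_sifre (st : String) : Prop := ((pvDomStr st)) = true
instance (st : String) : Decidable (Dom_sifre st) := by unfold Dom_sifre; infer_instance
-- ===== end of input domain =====

-- B drops A's intermediate shifted list and scans the string once with an early exit (simpler decomposition).

-- ===== PORT A =====
-- A's shift of one character: chr(ord(c)-10) if ord(c)-10 >= 97 else chr(ord(c)-10+26)
def sifreShiftA (c : Char) : Char :=
  if c.toNat - 10 ≥ 97 then Char.ofNat (c.toNat - 10) else Char.ofNat (c.toNat - 10 + 26)

def sifre (st : String) : Bool :=
  let lista := st.toList.foldl (fun acc slovo => acc ++ [sifreShiftA slovo]) []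
  ("aeiou".toList).any (fun item => item ∈ lista)

-- ===== PORT B =====
-- B's shift: o = ord(c)-10; if o < 97: o += 26; chr(o)
def sifreShiftB (c : Char) : Char :=
  let o := c.toNat - 10
  let o := if o < 97 then o + 26 else o
  Char.ofNat o

def sifre_alt (st : String) : Bool :=
  st.toList.any (fun slovo => sifreShiftB slovo ∈ "aeiou".toList)

-- ===== PRECONDITION & SPEC =====
def Spec_sifre (st : String) (out : Bool) : Prop := out = sifre_alt st
instance (st : String) (out : Bool) : Decidable (Spec_sifre st out) := by unfold Spec_sifre; infer_instance

-- ===== CLAIM (what is proved, stated in full; the proofs are below) =====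
def Claim_equal_sifre : Prop := ∀ (st : String), Dom_sifre st → Spec_sifre st (sifre st)

-- ===== LEMMAS AND PROOFS =====
theorem sifre_shift_eq (c : Char) : sifreShiftA c = sifreShiftB c := by
  simp only [sifreShiftA, sifreShiftB]
  by_cases h : c.toNat - 10 ≥ 97
  · simp [h, Nat.not_lt.mpr h]
  · simp [h, Nat.not_le.mp h]

theorem sifre_foldl_append (l : List Char) (acc : List Char) :
    l.foldl (fun acc slovo => acc ++ [sifreShiftA slovo]) acc = acc ++ l.map sifreShiftA := by
  induction l generalizing acc with
  | nil => simp
  | cons x xs ih => simp [ih]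

-- ===== VERDICT (by name: the statement is the Claim_ definition above) =====
theorem sifre_spec : Claim_equal_sifre := by
  intro st _
  show sifre st = sifre_alt st
  simp only [sifre, sifre_alt, sifre_foldl_append, List.nil_append]
  rw [Bool.eq_iff_iff]
  simp only [List.any_eq_true, List.mem_map, decide_eq_true_eq]
  constructor
  · rintro ⟨v, hv, c, hc, hshift⟩
    exact ⟨c, hc, by rw [← sifre_shift_eq, hshift]; exact hv⟩
  · rintro ⟨c, hc, hd⟩
    exact ⟨sifreShiftB c, hd, c, hc, sifre_shift_eq c⟩
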